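-- pv_equiv track=rewrite | github.com/KIRUBAKARAN9840/tele-gym-type-back | app/fittbot_api/v1/client/client_api/chatbot/chatbot_services/workout_llm_helper.py | _get_exercise_emoji_for_markdown
-- ===== SOURCE A (Python) =====
-- def _get_exercise_emoji_for_markdown(exercise_name: str) -> str:
--     """Get relevant emoji based on exercise type for markdown display"""
--     exercise_name_lower = exercise_name.lower()
--
--     if any(word in exercise_name_lower for word in ['squat', 'leg', 'deadlift', 'lunge']):
--         return "🦵"
--     elif any(word in exercise_name_lower for word in ['bench', 'press', 'chest', 'push']):
--         return "💪"
--     elif any(word in exercise_name_lower for word in ['pull', 'row', 'lat', 'back']):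
--         return "🎣"
--     elif any(word in exercise_name_lower for word in ['shoulder', 'overhead', 'lateral']):
--         return "🤲"
--     elif any(word in exercise_name_lower for word in ['curl', 'bicep', 'arm']):
--         return "💪"
--     elif any(word in exercise_name_lower for word in ['tricep', 'dip', 'extension']):
--         return "💥"
--     elif any(word in exercise_name_lower for word in ['core', 'plank', 'abs', 'crunch']):
--         return "🔥"
--     elif any(word in exercise_name_lower for word in ['cardio', 'run', 'bike', 'treadmill']):
--         return "🏃"
--     else:
--         return "🏋️"
-- ===== SOURCE B (Python) =====
-- # Aggregating re-implementation: instead of an early-return chain of group checks,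
-- # collect ALL matching keywords in one pass and return the emoji of the
-- # highest-priority (lowest index) match; 8 = no match -> default.
-- _KEYWORD_PRIORITY = {
--     "squat": 0, "leg": 0, "deadlift": 0, "lunge": 0,
--     "bench": 1, "press": 1, "chest": 1, "push": 1,
--     "pull": 2, "row": 2, "lat": 2, "back": 2,
--     "shoulder": 3, "overhead": 3, "lateral": 3,
--     "curl": 4, "bicep": 4, "arm": 4,
--     "tricep": 5, "dip": 5, "extension": 5,
--     "core": 6, "plank": 6, "abs": 6, "crunch": 6,
--     "cardio": 7, "run": 7, "bike": 7, "treadmill": 7,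
-- }
-- _EMOJIS = ["\U0001F9B5", "\U0001F4AA", "\U0001F3A3", "\U0001F932",
--            "\U0001F4AA", "\U0001F4A5", "\U0001F525", "\U0001F3C3",
--            "\U0001F3CB\uFE0F"]
--
-- def _get_exercise_emoji_for_markdown(exercise_name: str) -> str:
--     name = exercise_name.lower()
--     best = 8
--     for keyword, priority in _KEYWORD_PRIORITY.items():
--         if keyword in name:
--             best = min(best, priority)
--     return _EMOJIS[best]
-- ===== Notes on version B (the rewrite author's own statement) =====
-- stated objective: alternative
-- what changed: Replaces the early-return if-elif chain of per-group any() checks with a single aggregating pass over a flat keyword-to-priority map that computes the minimum priority among all matching keywords and indexes an emoji array with it.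
import Mathlib
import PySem

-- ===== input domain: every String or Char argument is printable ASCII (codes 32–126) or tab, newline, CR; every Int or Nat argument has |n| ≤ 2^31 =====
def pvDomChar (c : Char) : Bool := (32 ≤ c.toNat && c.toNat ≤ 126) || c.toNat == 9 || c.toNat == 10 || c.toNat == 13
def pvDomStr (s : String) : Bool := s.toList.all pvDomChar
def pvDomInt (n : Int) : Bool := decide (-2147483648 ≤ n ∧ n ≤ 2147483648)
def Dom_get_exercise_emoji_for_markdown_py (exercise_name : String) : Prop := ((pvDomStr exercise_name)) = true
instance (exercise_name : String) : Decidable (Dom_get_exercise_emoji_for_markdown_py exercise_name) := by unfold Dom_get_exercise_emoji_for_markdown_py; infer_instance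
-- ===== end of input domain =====

-- B replaces A's early-return if-elif chain with one aggregating pass over a flat keyword→priority
-- map, taking the minimum priority among all matching keywords; same return value (alternative).

-- ===== PORT A =====
-- A: literal port of the if-elif chain over 'any(word in lower_name)'.
def get_exercise_emoji_for_markdown_py (exercise_name : String) : String :=
  let low := PySem.Str.lower exercise_name
  if ["squat", "leg", "deadlift", "lunge"].any (fun w => PySem.Str.isIn w low) then "🦵"
  else if ["bench", "press", "chest", "push"].any (fun w => PySem.Str.isIn w low) then "💪"
  else if ["pull", "row", "lat", "back"].any (fun w => PySem.Str.isIn w low) then "🎣"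
  else if ["shoulder", "overhead", "lateral"].any (fun w => PySem.Str.isIn w low) then "🤲"
  else if ["curl", "bicep", "arm"].any (fun w => PySem.Str.isIn w low) then "💪"
  else if ["tricep", "dip", "extension"].any (fun w => PySem.Str.isIn w low) then "💥"
  else if ["core", "plank", "abs", "crunch"].any (fun w => PySem.Str.isIn w low) then "🔥"
  else if ["cardio", "run", "bike", "treadmill"].any (fun w => PySem.Str.isIn w low) then "🏃"
  else "🏋️"

-- ===== PORT B =====
-- B: a flat keyword→priority association list (dict iteration order = insertion order).
def pvKeywordPriority : List (String × Nat) :=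
  [("squat", 0), ("leg", 0), ("deadlift", 0), ("lunge", 0),
   ("bench", 1), ("press", 1), ("chest", 1), ("push", 1),
   ("pull", 2), ("row", 2), ("lat", 2), ("back", 2),
   ("shoulder", 3), ("overhead", 3), ("lateral", 3),
   ("curl", 4), ("bicep", 4), ("arm", 4),
   ("tricep", 5), ("dip", 5), ("extension", 5),
   ("core", 6), ("plank", 6), ("abs", 6), ("crunch", 6),
   ("cardio", 7), ("run", 7), ("bike", 7), ("treadmill", 7)]

def pvEmojis : List String := ["🦵", "💪", "🎣", "🤲", "💪", "💥", "🔥", "🏃", "🏋️"]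

-- the loop: best = min(best, priority) for every matching keyword, starting at 8
def get_exercise_emoji_for_markdown_py_alt (exercise_name : String) : String :=
  let name := PySem.Str.lower exercise_name
  let best := pvKeywordPriority.foldl
    (fun best kp => if PySem.Str.isIn kp.1 name then min best kp.2 else best) 8
  pvEmojis.getD best "🏋️"   -- best ≤ 8 always, so the default is never used (Python indexes the list)

-- ===== PRECONDITION & SPEC =====
def Spec_get_exercise_emoji_for_markdown_py (exercise_name : String) (out : String) : Prop := out = get_exercise_emoji_for_markdown_py_alt exercise_name
instance (exercise_name : String) (out : String) : Decidable (Spec_get_exercise_emoji_for_markdown_py exercise_name out) := by unfold Spec_get_exercise_emoji_for_markdown_py; infer_instance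

-- ===== CLAIM (what is proved, stated in full; the proofs are below) =====
def Claim_equal_get_exercise_emoji_for_markdown_py : Prop := ∀ (exercise_name : String), Dom_get_exercise_emoji_for_markdown_py exercise_name → Spec_get_exercise_emoji_for_markdown_py exercise_name (get_exercise_emoji_for_markdown_py exercise_name)

-- ===== LEMMAS AND PROOFS =====

-- folding B's step over one priority group's keywords = one group-level 'any' test
theorem pvFold_group (name : String) (kws : List String) (g acc : Nat) :
    (kws.map (fun k => (k, g))).foldl
      (fun best kp => if PySem.Str.isIn kp.1 name then min best kp.2 else best) acc
    = if kws.any (fun k => PySem.Str.isIn k name) then min acc g else acc := by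
  induction kws generalizing acc with
  | nil => simp
  | cons k t ih =>
    simp only [List.map_cons, List.foldl_cons, List.any_cons, ih]
    by_cases hk : PySem.Str.isIn k name = true <;>
    by_cases ht : (t.any fun k => PySem.Str.isIn k name) = true <;>
    (simp only [hk, ht, Bool.true_or, Bool.false_or, Bool.false_eq_true, if_false, if_true]) <;> omega

set_option maxHeartbeats 1000000 in
-- ===== VERDICT (by name: the statement is the Claim_ definition above) =====
theorem get_exercise_emoji_for_markdown_py_spec : Claim_equal_get_exercise_emoji_for_markdown_py := by
  intro s _
  unfold Spec_get_exercise_emoji_for_markdown_py get_exercise_emoji_for_markdown_py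
    get_exercise_emoji_for_markdown_py_alt
  have htab : pvKeywordPriority =
      (["squat", "leg", "deadlift", "lunge"].map (fun k => (k, 0))) ++
      (["bench", "press", "chest", "push"].map (fun k => (k, 1))) ++
      (["pull", "row", "lat", "back"].map (fun k => (k, 2))) ++
      (["shoulder", "overhead", "lateral"].map (fun k => (k, 3))) ++
      (["curl", "bicep", "arm"].map (fun k => (k, 4))) ++
      (["tricep", "dip", "extension"].map (fun k => (k, 5))) ++
      (["core", "plank", "abs", "crunch"].map (fun k => (k, 6))) ++
      (["cardio", "run", "bike", "treadmill"].map (fun k => (k, 7))) := by rfl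
  rw [htab]
  simp only [List.foldl_append, pvFold_group]
  generalize (["squat", "leg", "deadlift", "lunge"].any (fun w => PySem.Str.isIn w (PySem.Str.lower s))) = b0
  generalize (["bench", "press", "chest", "push"].any (fun w => PySem.Str.isIn w (PySem.Str.lower s))) = b1
  generalize (["pull", "row", "lat", "back"].any (fun w => PySem.Str.isIn w (PySem.Str.lower s))) = b2
  generalize (["shoulder", "overhead", "lateral"].any (fun w => PySem.Str.isIn w (PySem.Str.lower s))) = b3
  generalize (["curl", "bicep", "arm"].any (fun w => PySem.Str.isIn w (PySem.Str.lower s))) = b4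
  generalize (["tricep", "dip", "extension"].any (fun w => PySem.Str.isIn w (PySem.Str.lower s))) = b5
  generalize (["core", "plank", "abs", "crunch"].any (fun w => PySem.Str.isIn w (PySem.Str.lower s))) = b6
  generalize (["cardio", "run", "bike", "treadmill"].any (fun w => PySem.Str.isIn w (PySem.Str.lower s))) = b7
  cases b0 <;> cases b1 <;> cases b2 <;> cases b3 <;> cases b4 <;> cases b5 <;> cases b6 <;> cases b7 <;> rfl
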